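-- pv_equiv track=rewrite | github.com/pratit989/JARVIS | J.A.R.V.I.S._Mark_II.py | what_is_your_nationality
-- ===== SOURCE A (Python) =====
-- def what_is_your_nationality(what_is_your_nationality_dict, voice_note_para, which_is_your_country_dict):
--     for key_var, value_var in what_is_your_nationality_dict.items():
--         try:
--             if key_var == voice_note_para.split('is your nationality')[0]:
--                 return True
--             elif value_var == voice_note_para.split('your nationality')[0]:
--                 return True
--             elif key_var == voice_note_para.split('is your country')[0]:
--                 return True
--             elif value_var == voice_note_para.split('your country')[0]:
--                 return True
--             elif key_var == voice_note_para.split('country do you belong to')[0]: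
--                 return True
--             elif value_var == voice_note_para.split('is your nation')[0]:
--                 return True
--             elif key_var == voice_note_para.split('your nation')[0]:
--                 return True
--         except IndexError:
--             pass
--     for key_var, value_var in which_is_your_country_dict.items():
--         try:
--             if key_var == voice_note_para.split('is your nationality')[0]:
--                 return True
--             elif value_var == voice_note_para.split('your nationality')[0]:
--                 return True
--             elif key_var == voice_note_para.split('is your country')[0]:
--                 return True
--             elif value_var == voice_note_para.split('your country')[0]:
--                 return True
--             elif key_var == voice_note_para.split('country do you belong to')[0]:
--                 return True
--             elif value_var == voice_note_para.split('is your nation')[0]: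
--                 return True
--             elif key_var == voice_note_para.split('your nation')[0]:
--                 return True
--         except IndexError:
--             pass
--     return False
-- ===== SOURCE B (Python) =====
-- def what_is_your_nationality(what_is_your_nationality_dict, voice_note_para, which_is_your_country_dict):
--     # A string t equals voice_note_para.split(sep)[0] iff t is a prefix of the
--     # paragraph whose length is exactly the cut position of sep (first occurrence,
--     # or the whole length when sep is absent).  So: compute the cut positions once
--     # with str.find, then match each dict entry by length + one startswith test.
--     def cut(sep):
--         i = voice_note_para.find(sep)
--         return len(voice_note_para) if i < 0 else i
--     key_cuts = {cut(sep) for sep in ('is your nationality', 'is your country',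
--                                      'country do you belong to', 'your nation')}
--     value_cuts = {cut(sep) for sep in ('your nationality', 'your country', 'is your nation')}
--     for key_var, value_var in list(what_is_your_nationality_dict.items()) + list(which_is_your_country_dict.items()):
--         if (len(key_var) in key_cuts and voice_note_para.startswith(key_var)) \
--            or (len(value_var) in value_cuts and voice_note_para.startswith(value_var)):
--             return True
--     return False
-- ===== Notes on version B (the rewrite author's own statement) =====
-- stated objective: faster
-- what changed: B never splits: it computes the seven first-occurrence cut positions of the paragraph once with str.find and matches each dict entry by length (set of integer cut positions per role) plus a single startswith test, instead of recomputing seven split prefixes and comparing strings per entry.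
import Mathlib
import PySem

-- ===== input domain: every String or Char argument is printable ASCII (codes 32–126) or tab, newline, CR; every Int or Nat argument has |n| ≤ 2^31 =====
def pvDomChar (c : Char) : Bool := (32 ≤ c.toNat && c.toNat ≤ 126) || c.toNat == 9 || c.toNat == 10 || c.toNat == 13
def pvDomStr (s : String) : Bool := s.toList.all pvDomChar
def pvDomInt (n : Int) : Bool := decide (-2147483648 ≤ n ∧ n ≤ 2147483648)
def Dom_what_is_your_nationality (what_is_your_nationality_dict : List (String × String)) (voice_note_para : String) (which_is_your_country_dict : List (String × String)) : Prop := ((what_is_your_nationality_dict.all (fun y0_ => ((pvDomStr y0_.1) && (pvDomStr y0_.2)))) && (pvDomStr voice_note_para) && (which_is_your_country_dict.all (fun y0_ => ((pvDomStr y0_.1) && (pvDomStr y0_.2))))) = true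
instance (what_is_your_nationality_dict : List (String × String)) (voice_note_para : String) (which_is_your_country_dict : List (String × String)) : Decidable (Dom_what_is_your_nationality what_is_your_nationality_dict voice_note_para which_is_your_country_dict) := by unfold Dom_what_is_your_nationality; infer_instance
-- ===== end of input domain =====

-- B computes the seven first-occurrence cut positions of the paragraph once (str.find) and matches
-- each entry by length + one startswith test, instead of recomputing seven split prefixes per entry
-- (objective: faster, no per-entry splitting).

-- ===== PORT A =====
-- s.split(sep)[0] with a nonempty literal sep: splitOn is always nonempty, so getD/headD defaults are never taken (exact)
def pvAFirst (s sep : String) : String := ((PySem.Str.split? s sep).getD []).headD ""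

-- the seven-way if/elif chain of A's loop body (each branch 'return True'; the except IndexError is dead code)
def pvAMatch (para k v : String) : Bool :=
  if k == pvAFirst para "is your nationality" then true
  else if v == pvAFirst para "your nationality" then true
  else if k == pvAFirst para "is your country" then true
  else if v == pvAFirst para "your country" then true
  else if k == pvAFirst para "country do you belong to" then true
  else if v == pvAFirst para "is your nation" then true
  else if k == pvAFirst para "your nation" then true
  else false

-- one 'for key_var, value_var in d.items():' loop with early return True
def pvALoop (para : String) : List (String × String) → Bool
  | [] => false
  | (k, v) :: rest => if pvAMatch para k v then true else pvALoop para rest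

def what_is_your_nationality (what_is_your_nationality_dict : List (String × String)) (voice_note_para : String) (which_is_your_country_dict : List (String × String)) : Bool :=
  if pvALoop voice_note_para what_is_your_nationality_dict then true
  else if pvALoop voice_note_para which_is_your_country_dict then true
  else false

-- ===== PORT B =====
-- cut(sep): index of the first occurrence of sep in the paragraph, or its whole length when absent
def pvCut (para sep : String) : Int :=
  let i := PySem.Str.find para sep
  if i < 0 then PySem.Str.len para else i

-- the for loop over the concatenated items lists with early return True
def pvBLoop (para : String) (keyCuts valCuts : PySem.Set Int) : List (String × String) → Bool
  | [] => false
  | (k, v) :: rest =>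
    if (keyCuts.contains (PySem.Str.len k) && PySem.Str.startswith para k)
        || (valCuts.contains (PySem.Str.len v) && PySem.Str.startswith para v) then true
    else pvBLoop para keyCuts valCuts rest

def what_is_your_nationality_alt (what_is_your_nationality_dict : List (String × String)) (voice_note_para : String) (which_is_your_country_dict : List (String × String)) : Bool :=
  let keyCuts := PySem.Set.ofList (["is your nationality", "is your country", "country do you belong to", "your nation"].map (pvCut voice_note_para))
  let valCuts := PySem.Set.ofList (["your nationality", "your country", "is your nation"].map (pvCut voice_note_para))
  pvBLoop voice_note_para keyCuts valCuts (what_is_your_nationality_dict ++ which_is_your_country_dict)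

-- ===== PRECONDITION & SPEC =====
def Spec_what_is_your_nationality (what_is_your_nationality_dict : List (String × String)) (voice_note_para : String) (which_is_your_country_dict : List (String × String)) (out : Bool) : Prop := out = what_is_your_nationality_alt what_is_your_nationality_dict voice_note_para which_is_your_country_dict
instance (what_is_your_nationality_dict : List (String × String)) (voice_note_para : String) (which_is_your_country_dict : List (String × String)) (out : Bool) : Decidable (Spec_what_is_your_nationality what_is_your_nationality_dict voice_note_para which_is_your_country_dict out) := by unfold Spec_what_is_your_nationality; infer_instance

-- ===== CLAIM (what is proved, stated in full; the proofs are below) =====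
def Claim_equal_what_is_your_nationality : Prop := ∀ (what_is_your_nationality_dict : List (String × String)) (voice_note_para : String) (which_is_your_country_dict : List (String × String)), Dom_what_is_your_nationality what_is_your_nationality_dict voice_note_para which_is_your_country_dict → Spec_what_is_your_nationality what_is_your_nationality_dict voice_note_para which_is_your_country_dict (what_is_your_nationality what_is_your_nationality_dict voice_note_para which_is_your_country_dict)

-- ===== LEMMAS AND PROOFS =====

-- the first chunk that splitOn produces, structurally
def pvFirstChunk (sep : List Char) : List Char → List Char
  | [] => []
  | c :: rest => if sep.isPrefixOf (c :: rest) then [] else c :: pvFirstChunk sep rest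

-- pvCut on the Chars level, as a Nat
def pvCutN (s sep : List Char) : Nat :=
  if PySem.Chars.find s sep < 0 then s.length else (PySem.Chars.find s sep).toNat

-- once the accumulator is nonempty, the head of go's result is the accumulator's last element
theorem go_headD_append (sep : List Char) (fuel : Nat) (l cur : List Char)
    (acc : List (List Char)) (x d : List Char) :
    (PySem.Chars.splitOn.go sep fuel l cur (acc ++ [x])).headD d = x := by
  induction fuel generalizing l cur acc with
  | zero =>
    rw [PySem.Chars.splitOn.go]
    simp
  | succ fuel ih =>
    cases l with
    | nil =>
      rw [PySem.Chars.splitOn.go]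
      simp
      all_goals omega
    | cons c rest =>
      rw [PySem.Chars.splitOn.go]
      split
      · have h2 : cur.reverse :: (acc ++ [x]) = (cur.reverse :: acc) ++ [x] := rfl
        rw [h2, ih]
      · exact ih rest (c :: cur) acc

-- with empty accumulator, go's head is cur.reverse ++ the first chunk of l
theorem go_headD_nil (sep : List Char) (fuel : Nat) (l cur d : List Char)
    (h : l.length < fuel) :
    (PySem.Chars.splitOn.go sep fuel l cur []).headD d = cur.reverse ++ pvFirstChunk sep l := by
  induction fuel generalizing l cur with
  | zero => omega
  | succ fuel ih =>
    cases l with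
    | nil =>
      rw [PySem.Chars.splitOn.go]
      simp [pvFirstChunk]
      all_goals omega
    | cons c rest =>
      rw [PySem.Chars.splitOn.go]
      split
      · rename_i hp
        have h2 : cur.reverse :: ([] : List (List Char)) = [] ++ [cur.reverse] := rfl
        rw [h2, go_headD_append]
        simp [pvFirstChunk, hp]
      · rename_i hp
        rw [ih rest (c :: cur) (by simp at h ⊢; omega)]
        simp [pvFirstChunk, hp]

theorem splitOn_headD (s sep : List Char) :
    (PySem.Chars.splitOn s sep).headD [] = pvFirstChunk sep s := by
  rw [PySem.Chars.splitOn, go_headD_nil sep (s.length + 1) s [] [] (by omega)]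
  simp

-- cut-position facts
theorem cutN_of_prefix (s sep : List Char) (h : sep <+: s) : pvCutN s sep = 0 := by
  have hge : 0 ≤ PySem.Chars.find s sep := (PySem.Chars.find_nonneg_iff s sep).mpr h.isInfix
  obtain ⟨_, hmin⟩ := PySem.Chars.find_spec hge
  have h0 : ¬ (0 < (PySem.Chars.find s sep).toNat) := fun hc => hmin 0 hc (by simpa using h)
  unfold pvCutN
  rw [if_neg (by omega)]
  omega

theorem cutN_cons (c : Char) (rest sep : List Char) (hp : ¬ sep <+: (c :: rest)) :
    pvCutN (c :: rest) sep = pvCutN rest sep + 1 := by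
  unfold pvCutN
  by_cases hr : PySem.Chars.find rest sep < 0
  · -- sep occurs neither in rest nor (not being a prefix) in c :: rest
    have hnr : ¬ sep <:+: rest := by
      rw [← PySem.Chars.find_eq_neg_one_iff]
      have := PySem.Chars.neg_one_le_find rest sep
      omega
    have hns : ¬ sep <:+: (c :: rest) := by
      rw [List.infix_cons_iff]
      tauto
    have hfs : PySem.Chars.find (c :: rest) sep = -1 := (PySem.Chars.find_eq_neg_one_iff _ _).mpr hns
    rw [hfs]
    simp [hr]
  · have hge : 0 ≤ PySem.Chars.find rest sep := by omega
    obtain ⟨hb, hmin⟩ := PySem.Chars.find_spec hge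
    have hinf : sep <:+: (c :: rest) :=
      List.infix_cons ((PySem.Chars.find_nonneg_iff rest sep).mp hge)
    have hge' : 0 ≤ PySem.Chars.find (c :: rest) sep :=
      (PySem.Chars.find_nonneg_iff _ _).mpr hinf
    obtain ⟨hb', hmin'⟩ := PySem.Chars.find_spec hge'
    set n := (PySem.Chars.find (c :: rest) sep).toNat with hn
    set m := (PySem.Chars.find rest sep).toNat with hm
    have hn0 : n ≠ 0 := by
      intro h0
      exact hp (by simpa [h0] using hb')
    obtain ⟨n', hne⟩ : ∃ n', n = n' + 1 := ⟨n - 1, by omega⟩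
    have hdrop : (c :: rest).drop n = rest.drop (n - 1) := by
      rw [hne]
      simp
    have hmle : m ≤ n - 1 := by
      by_contra hc
      exact hmin (n - 1) (by omega) (by rwa [← hdrop])
    have hnle : n ≤ m + 1 := by
      by_contra hc
      exact hmin' (m + 1) (by omega) (by simpa using hb)
    rw [if_neg (by omega), if_neg hr]
    omega

theorem firstChunk_eq_take (s sep : List Char) :
    pvFirstChunk sep s = s.take (pvCutN s sep) := by
  induction s with
  | nil => simp [pvFirstChunk]
  | cons c rest ih =>
    by_cases hp : sep <+: (c :: rest)
    · rw [cutN_of_prefix _ _ hp]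
      simp [pvFirstChunk, List.isPrefixOf_iff_prefix, hp]
    · rw [cutN_cons c rest sep hp]
      simp only [pvFirstChunk, List.isPrefixOf_iff_prefix]
      rw [if_neg hp, List.take_succ_cons, ih]

theorem cutN_le_length (s sep : List Char) : pvCutN s sep ≤ s.length := by
  unfold pvCutN
  have h1 := PySem.Chars.find_le_length s sep
  have h2 := PySem.Chars.neg_one_le_find s sep
  split <;> omega

theorem pvCut_eq_cutN (para sep : String) :
    pvCut para sep = (pvCutN para.toList sep.toList : Int) := by
  unfold pvCut pvCutN
  rw [PySem.Str.find_eq, PySem.Str.len]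
  split <;> rename_i h
  · rw [if_pos h]
  · rw [if_neg h]
    omega

-- the core per-separator equivalence: k equals para.split(sep)[0] iff k's length is sep's cut
-- position in para and para starts with k
theorem branch_iff (para k sep : String) (hsep : sep.toList ≠ []) :
    (k == pvAFirst para sep) = true ↔
      (pvCut para sep = PySem.Str.len k ∧ k.toList <+: para.toList) := by
  unfold pvAFirst
  rw [PySem.Str.split?, PySem.Chars.split?, if_neg (by simpa using hsep)]
  simp only [Option.map_some, Option.getD_some]
  have hhead : ((PySem.Chars.splitOn para.toList sep.toList).map String.ofList).headD "" =
      String.ofList ((PySem.Chars.splitOn para.toList sep.toList).headD []) := by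
    cases PySem.Chars.splitOn para.toList sep.toList <;> rfl
  rw [hhead, splitOn_headD, firstChunk_eq_take _ _]
  have hc := cutN_le_length para.toList sep.toList
  rw [beq_iff_eq, pvCut_eq_cutN, PySem.Str.len]
  constructor
  · intro h
    have ht : k.toList = para.toList.take (pvCutN para.toList sep.toList) := by
      rw [h, String.toList_ofList]
    constructor
    · rw [ht, List.length_take]
      omega
    · rw [ht]
      exact List.take_prefix _ _
  · rintro ⟨hlen, hpre⟩
    have hl : k.toList.length = pvCutN para.toList sep.toList := by omega
    have h2 := List.prefix_iff_eq_take.mp hpre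
    rw [hl] at h2
    rw [← h2, String.ofList_toList]

-- A's loop is an any over the entries
theorem loop_eq (para : String) (d : List (String × String)) :
    pvALoop para d = d.any (fun kv => pvAMatch para kv.1 kv.2) := by
  induction d with
  | nil => rfl
  | cons kv rest ih =>
    cases kv
    simp only [pvALoop, List.any_cons, ih]
    split_ifs <;> simp_all

theorem A_eq (d1 d2 : List (String × String)) (para : String) :
    what_is_your_nationality d1 para d2 = (d1 ++ d2).any (fun kv => pvAMatch para kv.1 kv.2) := by
  unfold what_is_your_nationality
  rw [loop_eq, loop_eq, List.any_append]
  split_ifs <;> simp_all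

-- B's loop is an any over the entries
theorem bloop_eq (para : String) (kc vc : PySem.Set Int) (d : List (String × String)) :
    pvBLoop para kc vc d = d.any (fun kv =>
      (kc.contains (PySem.Str.len kv.1) && PySem.Str.startswith para kv.1)
        || (vc.contains (PySem.Str.len kv.2) && PySem.Str.startswith para kv.2)) := by
  induction d with
  | nil => rfl
  | cons kv rest ih =>
    cases kv
    simp only [pvBLoop, List.any_cons, ih]
    split_ifs <;> simp_all

-- a seven-way if/elif chain returning true is a disjunction
theorem pvIfChain (a b c d e f g : Bool) :
    (if a then true else if b then true else if c then true else if d then true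
     else if e then true else if f then true else if g then true else false) =
    (a || b || c || d || e || f || g) := by
  cases a <;> cases b <;> cases c <;> cases d <;> cases e <;> cases f <;> cases g <;> rfl

-- per entry, A's seven-way chain equals B's length-set + startswith test
theorem entry_eq (para k v : String) :
    pvAMatch para k v =
      ((PySem.Set.contains (PySem.Set.ofList (["is your nationality", "is your country", "country do you belong to", "your nation"].map (pvCut para))) (PySem.Str.len k) && PySem.Str.startswith para k)
        || (PySem.Set.contains (PySem.Set.ofList (["your nationality", "your country", "is your nation"].map (pvCut para))) (PySem.Str.len v) && PySem.Str.startswith para v)) := by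
  have hA : pvAMatch para k v =
      ((k == pvAFirst para "is your nationality") || (v == pvAFirst para "your nationality") ||
       (k == pvAFirst para "is your country") || (v == pvAFirst para "your country") ||
       (k == pvAFirst para "country do you belong to") || (v == pvAFirst para "is your nation") ||
       (k == pvAFirst para "your nation")) := by
    unfold pvAMatch
    exact pvIfChain _ _ _ _ _ _ _
  rw [Bool.eq_iff_iff, hA]
  simp only [Bool.or_eq_true]
  rw [branch_iff para k "is your nationality" (by simp), branch_iff para v "your nationality" (by simp),
    branch_iff para k "is your country" (by simp), branch_iff para v "your country" (by simp),
    branch_iff para k "country do you belong to" (by simp), branch_iff para v "is your nation" (by simp),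
    branch_iff para k "your nation" (by simp)]
  simp only [Bool.and_eq_true, PySem.Set.contains_iff, PySem.Set.mem_ofList,
    List.map_cons, List.map_nil, List.mem_cons, List.not_mem_nil, or_false,
    PySem.Str.startswith_eq, PySem.Chars.startswith_iff]
  constructor
  · rintro ((((((h | h) | h) | h) | h) | h) | h)
    · exact Or.inl ⟨Or.inl h.1.symm, h.2⟩
    · exact Or.inr ⟨Or.inl h.1.symm, h.2⟩
    · exact Or.inl ⟨Or.inr (Or.inl h.1.symm), h.2⟩
    · exact Or.inr ⟨Or.inr (Or.inl h.1.symm), h.2⟩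
    · exact Or.inl ⟨Or.inr (Or.inr (Or.inl h.1.symm)), h.2⟩
    · exact Or.inr ⟨Or.inr (Or.inr h.1.symm), h.2⟩
    · exact Or.inl ⟨Or.inr (Or.inr (Or.inr h.1.symm)), h.2⟩
  · rintro (⟨h | h | h | h, hp⟩ | ⟨h | h | h, hp⟩)
    · exact Or.inl (Or.inl (Or.inl (Or.inl (Or.inl (Or.inl ⟨h.symm, hp⟩)))))
    · exact Or.inl (Or.inl (Or.inl (Or.inl (Or.inr ⟨h.symm, hp⟩))))
    · exact Or.inl (Or.inl (Or.inr ⟨h.symm, hp⟩))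
    · exact Or.inr ⟨h.symm, hp⟩
    · exact Or.inl (Or.inl (Or.inl (Or.inl (Or.inl (Or.inr ⟨h.symm, hp⟩)))))
    · exact Or.inl (Or.inl (Or.inl (Or.inr ⟨h.symm, hp⟩)))
    · exact Or.inl (Or.inr ⟨h.symm, hp⟩)

theorem B_eq (d1 d2 : List (String × String)) (para : String) :
    what_is_your_nationality_alt d1 para d2 = (d1 ++ d2).any (fun kv => pvAMatch para kv.1 kv.2) := by
  unfold what_is_your_nationality_alt
  rw [bloop_eq]
  congr 1
  funext kv
  exact (entry_eq para kv.1 kv.2).symm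

-- ===== VERDICT (by name: the statement is the Claim_ definition above) =====
theorem what_is_your_nationality_spec : Claim_equal_what_is_your_nationality := by
  intro d1 para d2 _
  unfold Spec_what_is_your_nationality
  rw [A_eq, B_eq]
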